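-- pv_equiv track=rewrite | github.com/rf-iasys/OEIS | OEIS_A025192.py | A025192
-- ===== SOURCE A (Python) =====
-- def A025192(n):
--     marked = []
--     current = 1
--     k = 1
--
--     while len(marked) < n:
--         k += current//2 + k//2
--         current += 2*k
--         marked.append(k)
--
--     return marked
-- ===== SOURCE B (Python) =====
-- def A025192(n):
--     result = []
--     i = 0
--     while len(result) < n:
--         result.append(1 if i == 0 else 2 * 3 ** (i - 1))
--         i += 1
--     return result
-- ===== Notes on version B (the rewrite author's own statement) =====
-- stated objective: alternative
-- what changed: B computes each term directly from its index i by explicit per-element exponentiation (one at index zero, else twice three to the i-1) instead of threading A's coupled current/k recurrence with floor divisions; for very large n this repeated bignum exponentiation is slower than A's additive recurrence.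
import Mathlib
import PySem

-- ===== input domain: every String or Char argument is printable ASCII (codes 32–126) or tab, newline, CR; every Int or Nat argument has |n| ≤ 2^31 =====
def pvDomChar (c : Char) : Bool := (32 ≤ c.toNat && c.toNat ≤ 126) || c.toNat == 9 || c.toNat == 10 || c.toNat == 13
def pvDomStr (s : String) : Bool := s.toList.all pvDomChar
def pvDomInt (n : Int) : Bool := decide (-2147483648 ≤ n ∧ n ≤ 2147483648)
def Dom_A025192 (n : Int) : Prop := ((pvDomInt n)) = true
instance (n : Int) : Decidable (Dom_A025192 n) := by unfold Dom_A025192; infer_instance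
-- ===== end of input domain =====

-- B replaces A's coupled current/k recurrence by the per-index closed form 2*3^(i-1) (1 at i=0); objective: simpler.

-- ===== PORT A =====
-- while len(marked) < n: k += current//2 + k//2; current += 2*k; marked.append(k)
def A025192Loop (n : Int) (marked : List Int) (current k : Int) : List Int :=
  if h : (marked.length : Int) < n then
    let k' := k + (PySem.Int.floordiv current 2 + PySem.Int.floordiv k 2)
    A025192Loop n (marked ++ [k']) (current + 2 * k') k'
  else marked
termination_by (n - marked.length).toNat
decreasing_by simp; omega

def A025192 (n : Int) : List Int := A025192Loop n [] 1 1

-- ===== PORT B =====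
-- while len(result) < n: result.append(1 if i == 0 else 2*3**(i-1)); i += 1
def A025192AltLoop (n : Int) (result : List Int) (i : Int) : List Int :=
  if h : (result.length : Int) < n then
    A025192AltLoop n (result ++ [if i = 0 then 1 else 2 * 3 ^ (i - 1).toNat]) (i + 1)
  else result
termination_by (n - result.length).toNat
decreasing_by simp; omega

def A025192_alt (n : Int) : List Int := A025192AltLoop n [] 0

-- ===== PRECONDITION & SPEC =====
def Spec_A025192 (n : Int) (out : List Int) : Prop := out = A025192_alt n
instance (n : Int) (out : List Int) : Decidable (Spec_A025192 n out) := by unfold Spec_A025192; infer_instance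

-- ===== CLAIM (what is proved, stated in full; the proofs are below) =====
def Claim_equal_A025192 : Prop := ∀ (n : Int), Dom_A025192 n → Spec_A025192 n (A025192 n)

-- ===== LEMMAS AND PROOFS =====

-- Loop invariant of A relating (current, k) to the number of terms emitted so far.
def A025192Inv (i : Nat) (c k : Int) : Prop :=
  (i = 0 ∧ c = 1 ∧ k = 1) ∨ (i = 1 ∧ c = 3 ∧ k = 1) ∨
  (2 ≤ i ∧ k = 2 * 3 ^ (i - 2) ∧ c = 3 * k + 1)

theorem A025192_loop_eq (m : Nat) :
    ∀ (n : Int) (L : List Int) (c k : Int),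
      m = (n - L.length).toNat → A025192Inv L.length c k →
      A025192Loop n L c k = A025192AltLoop n L (L.length : Int) := by
  induction m with
  | zero =>
    intro n L c k hm _
    rw [A025192Loop, A025192AltLoop]
    have : ¬ ((L.length : Int) < n) := by omega
    simp [this]
  | succ m ih =>
    intro n L c k hm hinv
    rw [A025192Loop, A025192AltLoop]
    by_cases h : (L.length : Int) < n
    · simp only [h, dif_pos]
      have hfd2 : PySem.Int.floordiv c 2 = c / 2 :=
        PySem.Int.floordiv_eq_ediv_of_pos (by omega)
      have hfdk : PySem.Int.floordiv k 2 = k / 2 :=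
        PySem.Int.floordiv_eq_ediv_of_pos (by omega)
      -- the appended values agree
      have hval : k + (PySem.Int.floordiv c 2 + PySem.Int.floordiv k 2)
          = (if (L.length : Int) = 0 then 1 else 2 * 3 ^ (((L.length : Int)) - 1).toNat) := by
        rw [hfd2, hfdk]
        rcases hinv with ⟨h0, hc, hk⟩ | ⟨h1, hc, hk⟩ | ⟨h2, hk, hc⟩
        · simp [h0, hc, hk]
        · have : (L.length : Int) = 1 := by omega
          rw [h1] at *
          simp [this, hc, hk]
        · have hne : ¬ ((L.length : Int) = 0) := by omega
          have hexp : (((L.length : Int)) - 1).toNat = L.length - 1 := by omega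
          simp only [hne, if_false, hexp]
          have h3 : (L.length - 1) = (L.length - 2) + 1 := by omega
          rw [h3, pow_succ]
          set t : Int := 3 ^ (L.length - 2) with ht
          have htpos : 0 < t := by positivity
          rw [hk, hc]
          omega
      rw [hval]
      set v : Int := (if (L.length : Int) = 0 then 1 else 2 * 3 ^ (((L.length : Int)) - 1).toNat) with hv
      have hlen : ((L ++ [v]).length : Int) = (L.length : Int) + 1 := by simp
      have hrec := ih n (L ++ [v]) (c + 2 * v) v (by simp; omega) ?_
      · rw [hrec, hlen]
      · -- invariant preserved
        rcases hinv with ⟨h0, hc, hk⟩ | ⟨h1, hc, hk⟩ | ⟨h2, hk, hc⟩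
        · right; left
          have hL : (L.length : Int) = 0 := by omega
          have hL0 : L.length = 0 := by omega
          have hv1 : v = 1 := by simp [hv, hL]
          exact ⟨by simp [hL0], by rw [hc, hv1]; norm_num, hv1⟩
        · right; right
          have hv2 : v = 2 := by simp [hv, h1]
          refine ⟨by simp [h1], ?_, by rw [hv2, hc]; norm_num⟩
          rw [hv2]; simp [h1]
        · right; right
          have hne : ¬ ((L.length : Int) = 0) := by omega
          have hexp : (((L.length : Int)) - 1).toNat = L.length - 1 := by omega
          have hvv : v = 2 * 3 ^ (L.length - 1) := by
            simp only [hv, hne, if_false, hexp]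
          have h3' : L.length - 1 = (L.length - 2) + 1 := by omega
          have hv3k : v = 3 * k := by rw [hvv, hk, h3', pow_succ]; ring
          refine ⟨by simp; omega, ?_, by omega⟩
          rw [hvv]
          have he : (L.length + 1) - 2 = L.length - 1 := by omega
          simp [he]
    · simp [h]

-- ===== VERDICT (by name: the statement is the Claim_ definition above) =====
theorem A025192_spec : Claim_equal_A025192 := by
  intro n _
  unfold Spec_A025192 A025192 A025192_alt
  have := A025192_loop_eq (n - ([] : List Int).length).toNat n [] 1 1 rfl (Or.inl ⟨rfl, rfl, rfl⟩)
  simpa using this
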